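-- pv_equiv track=rewrite | github.com/MystiaTech/Mai | src/mai/git/committer.py | _extract_context_from_files
-- ===== SOURCE A (Python) =====
-- from typing import List, Dict, Optional, Any, Set
--
-- def _extract_context_from_files(files: List[str]) -> Dict[str, str]:
--     """Extract context from changed files."""
--     context = {}
--
--     # Analyze file paths for context
--     model_files = [f for f in files if "model" in f.lower()]
--     git_files = [f for f in files if "git" in f.lower()]
--     core_files = [f for f in files if "core" in f.lower()]
--
--     if model_files:
--         context["system"] = "model interface"
--         context["operation"] = "model operations"
--     elif git_files:
--         context["system"] = "git workflows"
--         context["operation"] = "version control"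
--     elif core_files:
--         context["system"] = "core functionality"
--         context["operation"] = "system stability"
--     else:
--         context["system"] = "Mai"
--         context["operation"] = "functionality"
--
--     # Default scenario
--     context["scenario"] = "your conversations"
--     context["area"] = "Mai's capabilities"
--
--     return context
-- ===== SOURCE B (Python) =====
-- _TABLE = [
--     ("model", "model interface", "model operations"),
--     ("git", "git workflows", "version control"),
--     ("core", "core functionality", "system stability"),
-- ]
--
-- def _extract_context_from_files(files):
--     """Extract context from changed files."""
--     # Single pass over the files, maintaining the smallest matching priority
--     # index seen so far; the search range narrows as the best index improves,
--     # and the loop exits early once the top-priority keyword is found.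
--     best = len(_TABLE)
--     for f in files:
--         lf = f.lower()
--         best = next((i for i in range(best) if _TABLE[i][0] in lf), best)
--         if best == 0:
--             break
--     if best < len(_TABLE):
--         _, system, operation = _TABLE[best]
--     else:
--         system, operation = "Mai", "functionality"
--     return {
--         "system": system,
--         "operation": operation,
--         "scenario": "your conversations",
--         "area": "Mai's capabilities",
--     }
-- ===== Notes on version B (the rewrite author's own statement) =====
-- stated objective: alternative
-- what changed: Instead of materialising three filtered lists and choosing via an if/elif chain, B makes a single pass over the files computing the minimal matching priority index (narrowing the searched keyword range and exiting early at index 0), then looks the result up in the priority table.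
import Mathlib
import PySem

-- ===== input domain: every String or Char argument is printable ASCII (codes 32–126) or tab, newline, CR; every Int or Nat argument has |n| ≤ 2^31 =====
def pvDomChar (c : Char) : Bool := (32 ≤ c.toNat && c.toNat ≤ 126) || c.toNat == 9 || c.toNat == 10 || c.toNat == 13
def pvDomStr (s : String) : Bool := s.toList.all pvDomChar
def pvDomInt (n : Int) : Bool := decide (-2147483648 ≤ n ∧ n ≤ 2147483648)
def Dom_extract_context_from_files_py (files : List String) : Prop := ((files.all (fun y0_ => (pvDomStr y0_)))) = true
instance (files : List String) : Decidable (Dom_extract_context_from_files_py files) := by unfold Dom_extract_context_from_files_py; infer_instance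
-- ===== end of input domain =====

-- B replaces A's three filtered lists + if/elif chain by a single pass computing the minimal matching priority index, then a table lookup (alternative decomposition).


-- ===== PORT A =====
def extract_context_from_files_py (files : List String) : List (String × String) :=
  let context : PySem.Dict String String := PySem.Dict.empty
  let model_files := files.filter (fun f => PySem.Str.isIn "model" (PySem.Str.lower f))
  let git_files := files.filter (fun f => PySem.Str.isIn "git" (PySem.Str.lower f))
  let core_files := files.filter (fun f => PySem.Str.isIn "core" (PySem.Str.lower f))
  let context :=
    if model_files ≠ [] then
      (context.insert "system" "model interface").insert "operation" "model operations"
    else if git_files ≠ [] then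
      (context.insert "system" "git workflows").insert "operation" "version control"
    else if core_files ≠ [] then
      (context.insert "system" "core functionality").insert "operation" "system stability"
    else
      (context.insert "system" "Mai").insert "operation" "functionality"
  let context := context.insert "scenario" "your conversations"
  let context := context.insert "area" "Mai's capabilities"
  context.items

-- ===== PORT B =====
-- the priority table _TABLE from Source B
def pvTable : List (String × String × String) :=
  [("model", "model interface", "model operations"),
   ("git", "git workflows", "version control"),
   ("core", "core functionality", "system stability")]

-- next((i for i in range(best) if _TABLE[i][0] in lf), best)
def pvFirstIdx (lf : String) (best : Nat) : Nat :=
  match (List.range best).find?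
      (fun i => PySem.Str.isIn (((pvTable[i]?).map (fun t => t.1)).getD "") lf) with
  | some i => i
  | none => best

-- the for-loop from Source B: fold the minimal-priority-index update over the files, breaking at 0
def pvScan : List String → Nat → Nat
  | [], best => best
  | f :: rest, best =>
    let lf := PySem.Str.lower f
    let best' := pvFirstIdx lf best
    if best' = 0 then best' else pvScan rest best'

def extract_context_from_files_py_alt (files : List String) : List (String × String) :=
  let best := pvScan files pvTable.length
  let so : String × String :=
    match pvTable[best]? with
    | some (_, s, o) => (s, o)
    | none => ("Mai", "functionality")
  let context : PySem.Dict String String := PySem.Dict.empty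
  let context := context.insert "system" so.1
  let context := context.insert "operation" so.2
  let context := context.insert "scenario" "your conversations"
  let context := context.insert "area" "Mai's capabilities"
  context.items

-- ===== PRECONDITION & SPEC =====
def Spec_extract_context_from_files_py (files : List String) (out : List (String × String)) : Prop := out = extract_context_from_files_py_alt files
instance (files : List String) (out : List (String × String)) : Decidable (Spec_extract_context_from_files_py files out) := by unfold Spec_extract_context_from_files_py; infer_instance

-- ===== CLAIM =====
def Claim_equal_extract_context_from_files_py : Prop := ∀ (files : List String), Dom_extract_context_from_files_py files → Spec_extract_context_from_files_py files (extract_context_from_files_py files)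

-- ===== LEMMAS AND PROOFS =====
-- first keyword index matching a (lowercased) string, 3 if none
def pvMIdx (lf : String) : Nat :=
  if PySem.Str.isIn "model" lf then 0
  else if PySem.Str.isIn "git" lf then 1
  else if PySem.Str.isIn "core" lf then 2
  else 3

theorem pvFirstIdx_eq (lf : String) (best : Nat) (h : best ≤ 3) :
    pvFirstIdx lf best = min best (pvMIdx lf) := by
  interval_cases best <;>
    by_cases hm : PySem.Chars.isIn ['m','o','d','e','l'] lf.toList = true <;>
    by_cases hg : PySem.Chars.isIn ['g','i','t'] lf.toList = true <;>
    by_cases hc : PySem.Chars.isIn ['c','o','r','e'] lf.toList = true <;>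
    simp [pvFirstIdx, pvMIdx, pvTable, List.range_succ, List.find?, hm, hg, hc]

-- minimal matching priority index over all files
def pvM (files : List String) : Nat :=
  files.foldr (fun f acc => min (pvMIdx (PySem.Str.lower f)) acc) 3

theorem pvMIdx_le (lf : String) : pvMIdx lf ≤ 3 := by
  unfold pvMIdx; split_ifs <;> omega

theorem pvScan_eq (files : List String) : ∀ best, best ≤ 3 →
    pvScan files best = min best (pvM files) := by
  induction files with
  | nil => intro best h; simp [pvScan, pvM]; omega
  | cons f rest ih =>
    intro best h
    have hm := pvMIdx_le (PySem.Str.lower f)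
    simp only [pvScan, pvFirstIdx_eq _ _ h]
    have h' : min best (pvMIdx (PySem.Str.lower f)) ≤ 3 := le_trans (Nat.min_le_left _ _) h
    rw [ih _ h']
    have hstep : pvM (f :: rest) = min (pvMIdx (PySem.Str.lower f)) (pvM rest) := rfl
    rw [hstep]
    split_ifs <;> omega

theorem filter_ne_nil_iff_any {α : Type} (p : α → Bool) (xs : List α) :
    (xs.filter p ≠ []) ↔ xs.any p = true := by
  simp [List.filter_eq_nil_iff, List.any_eq_true]

theorem pvM_eq (files : List String) :
    pvM files =
      if files.any (fun f => PySem.Str.isIn "model" (PySem.Str.lower f)) then 0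
      else if files.any (fun f => PySem.Str.isIn "git" (PySem.Str.lower f)) then 1
      else if files.any (fun f => PySem.Str.isIn "core" (PySem.Str.lower f)) then 2
      else 3 := by
  induction files with
  | nil => simp [pvM]
  | cons f rest ih =>
    have hstep : pvM (f :: rest) = min (pvMIdx (PySem.Str.lower f)) (pvM rest) := rfl
    rw [hstep, ih]
    simp only [List.any_cons, Bool.or_eq_true]
    unfold pvMIdx
    by_cases h1 : PySem.Str.isIn "model" (PySem.Str.lower f) = true <;>
    by_cases h2 : PySem.Str.isIn "git" (PySem.Str.lower f) = true <;>
    by_cases h3 : PySem.Str.isIn "core" (PySem.Str.lower f) = true <;>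
    by_cases h4 : rest.any (fun g => PySem.Str.isIn "model" (PySem.Str.lower g)) = true <;>
    by_cases h5 : rest.any (fun g => PySem.Str.isIn "git" (PySem.Str.lower g)) = true <;>
    by_cases h6 : rest.any (fun g => PySem.Str.isIn "core" (PySem.Str.lower g)) = true <;>
    simp only [h1, h2, h3, h4, h5, h6] <;> simp

-- ===== VERDICT =====
theorem extract_context_from_files_py_spec : Claim_equal_extract_context_from_files_py := by
  intro files _
  unfold Spec_extract_context_from_files_py extract_context_from_files_py extract_context_from_files_py_alt
  have hlen : pvTable.length = 3 := rfl
  rw [hlen, pvScan_eq files 3 (by omega), pvM_eq]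
  simp only [filter_ne_nil_iff_any]
  split_ifs <;> simp_all [pvTable]
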